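-- pv_equiv track=rewrite | github.com/RubyYan888/RubyDocument | PyCode/func_py_find_semiperfect_numbers.py | func_py_find_semiperfect_numbers
-- ===== SOURCE A (Python) =====
-- def func_py_find_semiperfect_numbers(limit):
--     def sum_of_subsets(num):
--         divisors = [i for i in range(1, num) if num % i == 0]
--         for i in range(1, 1 << len(divisors)):
--             subset_sum = sum(divisors[j] for j in range(len(divisors)) if i & (1 << j))
--             if subset_sum == num:
--                 return True
--         return False
--
--     return [n for n in range(1, limit) if sum_of_subsets(n)]
-- ===== SOURCE B (Python) =====
-- def func_py_find_semiperfect_numbers(limit):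
--     # Subset-sum reachability per n: build the set of achievable divisor-subset
--     # sums (capped at n) instead of enumerating all 2^d subsets.
--     result = []
--     for num in range(1, limit):
--         divisors = [i for i in range(1, num) if num % i == 0]
--         reachable = {0}
--         for d in divisors:
--             reachable = reachable | {s + d for s in reachable if s + d <= num}
--         if num in reachable:
--             result.append(num)
--     return result
-- ===== Notes on version B (the rewrite author's own statement) =====
-- stated objective: faster
-- what changed: Replaces per-n exhaustive enumeration of all 2^d divisor subsets by a subset-sum reachability set (DP) built in one pass over the divisors, capped at n.
import Mathlib
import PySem

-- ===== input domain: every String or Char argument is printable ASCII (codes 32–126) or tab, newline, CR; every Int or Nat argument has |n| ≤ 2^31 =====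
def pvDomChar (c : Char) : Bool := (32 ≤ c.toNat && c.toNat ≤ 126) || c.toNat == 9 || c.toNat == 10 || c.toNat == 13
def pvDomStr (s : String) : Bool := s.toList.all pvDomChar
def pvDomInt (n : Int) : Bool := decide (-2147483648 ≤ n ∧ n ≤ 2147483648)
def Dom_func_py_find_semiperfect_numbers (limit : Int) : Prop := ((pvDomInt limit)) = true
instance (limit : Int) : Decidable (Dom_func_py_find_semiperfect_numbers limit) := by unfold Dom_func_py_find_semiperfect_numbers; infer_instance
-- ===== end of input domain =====

-- B replaces A's per-n enumeration of all 2^d divisor subsets by a subset-sum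
-- reachability set built in one pass over the divisors (objective: faster).

-- ===== PORT A =====

-- sum(divisors[j] for j in range(len(divisors)) if i & (1 << j)):
-- walks the divisors in index order, testing bit j of the mask (bit j = i % 2 after j halvings)
def aSubsetSum : List Int → Nat → Int
  | [], _ => 0
  | a :: rest, i => (if i % 2 = 1 then a else 0) + aSubsetSum rest (i / 2)

-- the inner 'sum_of_subsets(num)': early-return loop over masks 1 .. 2^d - 1 = any
def aInner (num : Int) : Bool :=
  let divisors := (PySem.List.pyRange 1 num 1).filter (fun i => PySem.Int.mod num i == 0)
  (List.range' 1 (2 ^ divisors.length - 1)).any (fun i => aSubsetSum divisors i == num)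

def func_py_find_semiperfect_numbers (limit : Int) : List Int :=
  (PySem.List.pyRange 1 limit 1).filter (fun n => aInner n)

-- ===== PORT B =====

-- reachable | {s + d for s in reachable if s + d <= num}
def bStep (num : Int) (reach : PySem.Set Int) (d : Int) : PySem.Set Int :=
  PySem.Set.union reach
    (PySem.Set.ofList ((reach.filter (fun s => s + d ≤ num)).map (fun s => s + d)))

def bIsSemiperfect (num : Int) : Bool :=
  let divisors := (PySem.List.pyRange 1 num 1).filter (fun i => PySem.Int.mod num i == 0)
  let reachable := divisors.foldl (bStep num) (PySem.Set.ofList [0])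
  PySem.Set.contains reachable num

def func_py_find_semiperfect_numbers_alt (limit : Int) : List Int :=
  (PySem.List.pyRange 1 limit 1).foldl
    (fun result n => if bIsSemiperfect n then result ++ [n] else result) []

-- ===== PRECONDITION & SPEC =====
def Spec_func_py_find_semiperfect_numbers (limit : Int) (out : List Int) : Prop := out = func_py_find_semiperfect_numbers_alt limit
instance (limit : Int) (out : List Int) : Decidable (Spec_func_py_find_semiperfect_numbers limit out) := by unfold Spec_func_py_find_semiperfect_numbers; infer_instance

-- ===== CLAIM (what is proved, stated in full; the proofs are below) =====
def Claim_equal_func_py_find_semiperfect_numbers : Prop := ∀ (limit : Int), Dom_func_py_find_semiperfect_numbers limit → Spec_func_py_find_semiperfect_numbers limit (func_py_find_semiperfect_numbers limit)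

-- ===== LEMMAS AND PROOFS =====

-- the sublist of ds selected by the bits of the mask i
def selectMask : List Int → Nat → List Int
  | [], _ => []
  | a :: rest, i => (if i % 2 = 1 then [a] else []) ++ selectMask rest (i / 2)

theorem aSubsetSum_eq_sum (ds : List Int) (i : Nat) :
    aSubsetSum ds i = (selectMask ds i).sum := by
  induction ds generalizing i with
  | nil => simp [aSubsetSum, selectMask]
  | cons a rest ih =>
      simp only [aSubsetSum, selectMask, List.sum_append, ih]
      split <;> simp

theorem selectMask_sublist (ds : List Int) (i : Nat) : (selectMask ds i).Sublist ds := by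
  induction ds generalizing i with
  | nil => simp [selectMask]
  | cons a rest ih =>
      simp only [selectMask]
      split
      · exact (ih (i / 2)).cons₂ a
      · exact (ih (i / 2)).cons a

theorem selectMask_surj (ds : List Int) (l : List Int) (hl : l.Sublist ds) :
    ∃ i < 2 ^ ds.length, selectMask ds i = l := by
  induction ds generalizing l with
  | nil =>
      refine ⟨0, by norm_num, ?_⟩
      simpa [selectMask] using (List.sublist_nil.mp hl).symm
  | cons a rest ih =>
      cases hl with
      | cons _ h =>
          obtain ⟨i, hi, hsel⟩ := ih _ h
          refine ⟨2 * i, ?_, ?_⟩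
          · have : 2 ^ (a :: rest).length = 2 * 2 ^ rest.length := by
              simp [List.length_cons, pow_succ]; ring
            omega
          · simp [selectMask, hsel, Nat.mul_mod_right]
      | cons₂ _ h =>
          obtain ⟨i, hi, hsel⟩ := ih _ h
          refine ⟨2 * i + 1, ?_, ?_⟩
          · have : 2 ^ (a :: rest).length = 2 * 2 ^ rest.length := by
              simp [List.length_cons, pow_succ]; ring
            omega
          · have h2 : (2 * i + 1) / 2 = i := by omega
            have h1 : (2 * i + 1) % 2 = 1 := by omega
            simp [selectMask, h1, h2, hsel]

theorem selectMask_eq_nil_iff (ds : List Int) (i : Nat) (hi : i < 2 ^ ds.length) :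
    selectMask ds i = [] ↔ i = 0 := by
  induction ds generalizing i with
  | nil =>
      simp only [List.length_nil, pow_zero] at hi
      simp [selectMask]; omega
  | cons a rest ih =>
      have hpow : 2 ^ (a :: rest).length = 2 * 2 ^ rest.length := by
        simp [List.length_cons, pow_succ]; ring
      have hi2 : i / 2 < 2 ^ rest.length := by omega
      constructor
      · intro h
        simp only [selectMask, List.append_eq_nil_iff] at h
        obtain ⟨h1, h2⟩ := h
        have : ¬ (i % 2 = 1) := by intro hc; simp [hc] at h1
        have := (ih (i / 2) hi2).mp h2
        omega
      · intro h
        subst h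
        simp [selectMask, (ih 0 (by positivity)).mpr rfl]

-- A's inner boolean decides: some nonempty sublist of the divisors sums to num
theorem aInner_iff (num : Int) :
    aInner num = true ↔
      ∃ l : List Int,
        l.Sublist ((PySem.List.pyRange 1 num 1).filter (fun i => PySem.Int.mod num i == 0)) ∧
        l ≠ [] ∧ l.sum = num := by
  unfold aInner
  set ds := (PySem.List.pyRange 1 num 1).filter (fun i => PySem.Int.mod num i == 0) with hds
  simp only [List.any_eq_true, List.mem_range', beq_iff_eq]
  constructor
  · rintro ⟨i, ⟨⟨k, hk, rfl⟩, hsum⟩⟩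
    refine ⟨selectMask ds (1 + 1 * k), selectMask_sublist _ _, ?_, ?_⟩
    · intro hnil
      have hlt : 1 + 1 * k < 2 ^ ds.length := by omega
      have := (selectMask_eq_nil_iff ds _ hlt).mp hnil
      omega
    · rw [← aSubsetSum_eq_sum]; exact hsum
  · rintro ⟨l, hsub, hne, hsum⟩
    obtain ⟨i, hi, hsel⟩ := selectMask_surj ds l hsub
    have hi0 : i ≠ 0 := by
      intro h; subst h
      exact hne ((selectMask_eq_nil_iff ds 0 hi).mpr rfl ▸ hsel.symm ▸ rfl)
    refine ⟨i, ⟨⟨i - 1, by omega, by omega⟩, ?_⟩⟩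
    rw [aSubsetSum_eq_sum, hsel, hsum]

-- membership in one DP step
theorem mem_bStep (num : Int) (reach : PySem.Set Int) (d x : Int) :
    x ∈ bStep num reach d ↔ x ∈ reach ∨ ∃ s ∈ reach, s + d ≤ num ∧ x = s + d := by
  unfold bStep
  simp only [PySem.Set.mem_union, PySem.Set.mem_ofList, List.mem_map, List.mem_filter,
    decide_eq_true_eq]
  constructor
  · rintro (h | ⟨s, ⟨hs, hle⟩, rfl⟩)
    · exact Or.inl h
    · exact Or.inr ⟨s, hs, hle, rfl⟩
  · rintro (h | ⟨s, hs, hle, rfl⟩)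
    · exact Or.inl h
    · exact Or.inr ⟨s, ⟨hs, hle⟩, rfl⟩

-- DP invariant: the reachable set after folding ds holds exactly the values
-- s + (sum of a sublist of ds) with s already reachable, capped at num
theorem mem_bFold (num : Int) (ds : List Int) (hpos : ∀ y ∈ ds, 0 ≤ y)
    (reach : PySem.Set Int) (x : Int) :
    x ∈ ds.foldl (bStep num) reach ↔
      ∃ s ∈ reach, ∃ l : List Int, l.Sublist ds ∧ x = s + l.sum ∧ (l = [] ∨ x ≤ num) := by
  induction ds generalizing reach with
  | nil =>
      simp only [List.foldl_nil]
      constructor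
      · intro h; exact ⟨x, h, [], by simp⟩
      · rintro ⟨s, hs, l, hl, rfl, _⟩
        simpa [List.sublist_nil.mp hl] using hs
  | cons d rest ih =>
      have hd : (0:Int) ≤ d := hpos d (List.mem_cons_self)
      have hpos' : ∀ y ∈ rest, 0 ≤ y := fun y hy => hpos y (List.mem_cons_of_mem _ hy)
      simp only [List.foldl_cons]
      rw [ih hpos']
      constructor
      · rintro ⟨s', hs', l, hl, rfl, hcap⟩
        rcases (mem_bStep num reach d s').mp hs' with h | ⟨s, hs, hle, rfl⟩
        · exact ⟨s', h, l, hl.cons d, rfl, hcap⟩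
        · refine ⟨s, hs, d :: l, hl.cons₂ d, by simp; ring, Or.inr ?_⟩
          rcases hcap with rfl | hle'
          · simpa using hle
          · exact hle'
      · rintro ⟨s, hs, l, hl, rfl, hcap⟩
        cases hl with
        | cons _ h =>
            exact ⟨s, (mem_bStep num reach d s).mpr (Or.inl hs), l, h, rfl, hcap⟩
        | cons₂ _ h =>
            rename_i l'
            have hsum : (0:Int) ≤ l'.sum :=
              List.sum_nonneg (fun y hy => hpos' y (h.subset hy))
            have hx : s + (d :: l').sum ≤ num := by
              rcases hcap with hc | hc
              · exact absurd hc (by simp)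
              · exact hc
            have hsd : s + d ≤ num := by simp [List.sum_cons] at hx; omega
            refine ⟨s + d, (mem_bStep num reach d (s + d)).mpr (Or.inr ⟨s, hs, hsd, rfl⟩),
              l', h, by simp [List.sum_cons]; ring, ?_⟩
            rcases hcap with hc | hc
            · exact absurd hc (by simp)
            · exact Or.inr hc

theorem mem_divisors_pos (num i : Int)
    (hi : i ∈ (PySem.List.pyRange 1 num 1).filter (fun j => PySem.Int.mod num j == 0)) :
    (0:Int) ≤ i := by
  have := List.mem_filter.mp hi
  have := (PySem.List.mem_pyRange_one).mp this.1
  omega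

-- for num ≥ 1 the two per-number tests agree
theorem inner_eq (num : Int) (hnum : 1 ≤ num) : aInner num = bIsSemiperfect num := by
  have hBdef : bIsSemiperfect num = PySem.Set.contains
      ((((PySem.List.pyRange 1 num 1).filter (fun i => PySem.Int.mod num i == 0))).foldl
        (bStep num) (PySem.Set.ofList [0])) num := rfl
  rw [hBdef]
  set ds := (PySem.List.pyRange 1 num 1).filter (fun i => PySem.Int.mod num i == 0) with hds
  have hpos : ∀ y ∈ ds, (0:Int) ≤ y := fun y hy => mem_divisors_pos num y hy
  have hB : PySem.Set.contains (ds.foldl (bStep num) (PySem.Set.ofList [0])) num = true ↔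
      num ∈ ds.foldl (bStep num) (PySem.Set.ofList [0]) := by
    simp [PySem.Set.contains]
  rcases Bool.eq_false_or_eq_true (aInner num) with hA | hA
  case inl =>
    rw [hA]
    symm
    rw [hB, mem_bFold num ds hpos]
    obtain ⟨l, hl, hne, hsum⟩ := (aInner_iff num).mp hA
    exact ⟨0, by simp [PySem.Set.ofList], l, hl, by omega, Or.inr (by omega)⟩
  case inr =>
    rw [hA]
    symm
    rw [Bool.eq_false_iff]
    intro hc
    rw [hB, mem_bFold num ds hpos] at hc
    obtain ⟨s, hs, l, hl, hsum, _⟩ := hc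
    have hs0 : s = 0 := by simpa [PySem.Set.ofList] using hs
    subst hs0
    have : aInner num = true := by
      rw [aInner_iff]
      refine ⟨l, hl, ?_, by omega⟩
      intro h; subst h; simp at hsum; omega
    rw [hA] at this; exact absurd this (by simp)

-- ===== VERDICT (by name: the statement is the Claim_ definition above) =====
theorem func_py_find_semiperfect_numbers_spec : Claim_equal_func_py_find_semiperfect_numbers := by
  intro limit _
  show _ = _
  unfold func_py_find_semiperfect_numbers func_py_find_semiperfect_numbers_alt
  rw [PySem.List.foldl_append_if_eq_filter]
  simp only [List.nil_append]
  apply List.filter_congr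
  intro n hn
  have h1 : 1 ≤ n := ((PySem.List.mem_pyRange_one).mp hn).1
  exact inner_eq n h1
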